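-- pv_equiv track=rewrite | github.com/GUCYENER/demo | app/services/ds_qa_generator.py | _extract_value_hints
-- ===== SOURCE A (Python) =====
-- def _extract_value_hints(sample_data: list, col_names: list) -> dict:
--     """
--     Örnek verilerden enum-benzeri kolonların olası değerlerini çıkarır.
--     Eğer bir kolonda 2-10 arası unique değer varsa, listeyi döner.
--     """
--     if not sample_data or not isinstance(sample_data, list):
--         return {}
--
--     value_hints = {}
--     for col_name in col_names:
--         values = set()
--         for row in sample_data:
--             if isinstance(row, dict) and col_name in row:
--                 val = row.get(col_name)
--                 if val is not None and str(val).strip():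
--                     values.add(str(val).strip()[:50])
--
--         # 2-10 arası unique değer → enum benzeri kolon
--         if 2 <= len(values) <= 10:
--             value_hints[col_name] = sorted(list(values))
--
--     return value_hints
-- ===== SOURCE B (Python) =====
-- from collections import defaultdict
--
--
-- def _extract_value_hints(sample_data: list, col_names: list) -> dict:
--     if not sample_data or not isinstance(sample_data, list):
--         return {}
--
--     wanted = set(col_names)
--     index = defaultdict(set)
--     for row in sample_data:
--         if isinstance(row, dict):
--             for key, val in row.items():
--                 if key in wanted and val is not None:
--                     text = str(val).strip()
--                     if text:
--                         index[key].add(text[:50])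
--
--     value_hints = {}
--     for col_name in col_names:
--         values = index.get(col_name, set())
--         if 2 <= len(values) <= 10:
--             value_hints[col_name] = sorted(values)
--     return value_hints
-- ===== Notes on version B (the rewrite author's own statement) =====
-- stated objective: faster
-- what changed: A scans all of sample_data once per column (column-major nested passes); B makes a single pass over sample_data building a defaultdict(set) index keyed by column, then one emission loop over col_names.
import Mathlib
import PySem

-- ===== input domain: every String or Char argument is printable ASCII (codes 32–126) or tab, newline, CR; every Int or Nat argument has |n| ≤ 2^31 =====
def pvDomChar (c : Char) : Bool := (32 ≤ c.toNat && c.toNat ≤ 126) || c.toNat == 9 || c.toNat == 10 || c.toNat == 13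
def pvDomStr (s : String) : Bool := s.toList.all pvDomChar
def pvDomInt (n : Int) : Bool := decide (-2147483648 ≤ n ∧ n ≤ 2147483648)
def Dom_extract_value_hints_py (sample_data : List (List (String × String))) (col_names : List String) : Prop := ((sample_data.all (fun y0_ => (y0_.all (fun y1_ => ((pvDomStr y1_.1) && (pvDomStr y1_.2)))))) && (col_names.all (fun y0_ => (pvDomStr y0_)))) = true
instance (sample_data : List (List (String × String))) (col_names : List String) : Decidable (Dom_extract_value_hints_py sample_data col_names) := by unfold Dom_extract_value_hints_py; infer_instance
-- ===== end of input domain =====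

-- B replaces A's column-major double scan (one full pass over sample_data per column) by ONE pass
-- over sample_data building a column → value-set index, then a single emission loop over col_names.

-- ===== PORT A =====
-- Literal port of A: for each column, scan all rows; 'isinstance(row, dict) and col_name in row'
-- + 'row.get' + 'val is not None' collapse to a successful first-match lookup (rows are str→str dicts).
def extract_value_hints_py (sample_data : List (List (String × String))) (col_names : List String) : List (String × List String) :=
  if sample_data = [] then []
  else
    (col_names.foldl (fun (value_hints : PySem.Dict String (List String)) col_name =>
        let values : PySem.Set String :=
          sample_data.foldl (fun (values : PySem.Set String) row =>
              match (PySem.Dict.mk row).get? col_name with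
              | some val =>
                  if PySem.Str.strip val ≠ "" then
                    values.add (PySem.Str.slice (PySem.Str.strip val) none (some 50))
                  else values
              | none => values)
            PySem.Set.empty
        if 2 ≤ PySem.Set.len values ∧ PySem.Set.len values ≤ 10 then
          value_hints.insert col_name (PySem.List.sorted values (fun x => x) false)
        else value_hints)
      (PySem.Dict.empty : PySem.Dict String (List String))).items

-- ===== PORT B =====
-- row.items() over the assoc-list model of a dict: first occurrence per key, in order (consistent
-- with lookup = first match); on an actual dict (unique keys) this is the identity.
def pvRowItemsAux (seen : PySem.Set String) : List (String × String) → List (String × String)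
  | [] => []
  | (k, v) :: rest =>
      if seen.contains k then pvRowItemsAux seen rest
      else (k, v) :: pvRowItemsAux (seen.add k) rest

def pvRowItems (row : List (String × String)) : List (String × String) :=
  pvRowItemsAux PySem.Set.empty row

-- body of B's inner loop: 'if key in wanted … text = str(val).strip() … index[key].add(text[:50])'
def pvStep (wanted : PySem.Set String) (index : PySem.Dict String (PySem.Set String))
    (kv : String × String) : PySem.Dict String (PySem.Set String) :=
  if wanted.contains kv.1 then
    let text := PySem.Str.strip kv.2
    if text ≠ "" then
      index.modify kv.1 PySem.Set.empty (fun s => s.add (PySem.Str.slice text none (some 50)))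
    else index
  else index

def extract_value_hints_py_alt (sample_data : List (List (String × String))) (col_names : List String) : List (String × List String) :=
  if sample_data = [] then []
  else
    let wanted : PySem.Set String := PySem.Set.ofList col_names
    let index : PySem.Dict String (PySem.Set String) :=
      sample_data.foldl (fun index row => (pvRowItems row).foldl (pvStep wanted) index)
        (PySem.Dict.empty : PySem.Dict String (PySem.Set String))
    (col_names.foldl (fun (value_hints : PySem.Dict String (List String)) col_name =>
        let values : PySem.Set String := index.getD col_name PySem.Set.empty
        if 2 ≤ PySem.Set.len values ∧ PySem.Set.len values ≤ 10 then
          value_hints.insert col_name (PySem.List.sorted values (fun x => x) false)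
        else value_hints)
      (PySem.Dict.empty : PySem.Dict String (List String))).items

-- ===== PRECONDITION & SPEC =====
def Spec_extract_value_hints_py (sample_data : List (List (String × String))) (col_names : List String) (out : List (String × List String)) : Prop := out = extract_value_hints_py_alt sample_data col_names
instance (sample_data : List (List (String × String))) (col_names : List String) (out : List (String × List String)) : Decidable (Spec_extract_value_hints_py sample_data col_names out) := by unfold Spec_extract_value_hints_py; infer_instance

-- ===== CLAIM (what is proved, stated in full; the proofs are below) =====
def Claim_equal_extract_value_hints_py : Prop := ∀ (sample_data : List (List (String × String))) (col_names : List String), Dom_extract_value_hints_py sample_data col_names → Spec_extract_value_hints_py sample_data col_names (extract_value_hints_py sample_data col_names)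

-- ===== LEMMAS AND PROOFS =====

-- the value transform both programs apply to one looked-up cell
def pvAdd (s : PySem.Set String) (val : String) : PySem.Set String :=
  if PySem.Str.strip val ≠ "" then
    s.add (PySem.Str.slice (PySem.Str.strip val) none (some 50))
  else s

-- the items with key c among a row's deduplicated items are exactly the first match for c
theorem contains_add_self (s : PySem.Set String) (k : String) : (s.add k).contains k = true := by
  simp [PySem.Set.contains, List.contains_eq_mem, PySem.Set.mem_add]

theorem contains_add_of_ne (s : PySem.Set String) (k c : String) (h : ¬ k = c) :
    (s.add k).contains c = s.contains c := by
  simp only [PySem.Set.contains, List.contains_eq_mem, decide_eq_decide, PySem.Set.mem_add]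
  exact or_iff_left (fun hc => h hc.symm)

theorem filter_pvRowItemsAux (c : String) (l : List (String × String)) :
    ∀ (seen : PySem.Set String),
      (pvRowItemsAux seen l).filter (fun kv => kv.1 == c) =
        if seen.contains c = true then []
        else (match (PySem.Dict.mk l).get? c with
              | some v => [(c, v)]
              | none => []) := by
  induction l with
  | nil =>
    intro seen
    by_cases h : seen.contains c = true
    · simp only [pvRowItemsAux, List.filter_nil, if_pos h]
    · simp only [pvRowItemsAux, List.filter_nil, if_neg h]
      rfl
  | cons kv rest ih =>
    intro seen
    obtain ⟨k, v⟩ := kv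
    by_cases hk : seen.contains k = true
    · rw [show pvRowItemsAux seen ((k, v) :: rest) = pvRowItemsAux seen rest by
        simp only [pvRowItemsAux]; rw [if_pos hk], ih seen]
      by_cases hc : seen.contains c = true
      · rw [if_pos hc, if_pos hc]
      · have hkc : (k == c) = false := by
          cases heq : (k == c)
          · rfl
          · exact absurd (by rwa [show k = c by simpa using heq] at hk) hc
        rw [if_neg hc, if_neg hc]
        rw [PySem.Dict.get?_mk_cons, hkc]
        simp
    · rw [show pvRowItemsAux seen ((k, v) :: rest) = (k, v) :: pvRowItemsAux (seen.add k) rest by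
        simp only [pvRowItemsAux]; rw [if_neg hk]]
      by_cases hkc : k = c
      · subst hkc
        rw [List.filter_cons_of_pos (by simp), ih (seen.add k), if_pos (contains_add_self seen k),
          if_neg hk, PySem.Dict.get?_mk_cons]
        simp
      · have hb : (k == c) = false := by simpa using hkc
        rw [List.filter_cons_of_neg (by simp [hb]), ih (seen.add k), contains_add_of_ne seen k c hkc]
        by_cases hc : seen.contains c = true
        · rw [if_pos hc, if_pos hc]
        · rw [if_neg hc, if_neg hc, PySem.Dict.get?_mk_cons, hb]
          simp

-- one row's inner fold, read at a wanted column c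
theorem getD_foldl_pvStep (w : PySem.Set String) (c : String) (hw : w.contains c = true)
    (l : List (String × String)) :
    ∀ (ix : PySem.Dict String (PySem.Set String)),
      (l.foldl (pvStep w) ix).getD c PySem.Set.empty =
        ((l.filter (fun kv => kv.1 == c)).map (·.2)).foldl pvAdd (ix.getD c PySem.Set.empty) := by
  have hwm : c ∈ w := by simpa [PySem.Set.contains, List.contains_eq_mem] using hw
  induction l with
  | nil => intro ix; rfl
  | cons kv t ih =>
    intro ix
    rw [List.foldl_cons, ih]
    by_cases hk : kv.1 = c
    · rw [List.filter_cons_of_pos (by simpa using hk), List.map_cons, List.foldl_cons]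
      congr 1
      by_cases hs : PySem.Str.strip kv.2 = ""
      · simp [pvStep, pvAdd, hs]
      · simp [pvStep, pvAdd, hk, hs, hwm, PySem.Set.contains, List.contains_eq_mem,
          PySem.Dict.getD_modify_self]
    · rw [List.filter_cons_of_neg (by simpa using hk)]
      congr 1
      by_cases h1 : kv.1 ∈ w
      · by_cases hs : PySem.Str.strip kv.2 = ""
        · simp [pvStep, hs]
        · simp [pvStep, h1, hs, PySem.Set.contains, List.contains_eq_mem,
            PySem.Dict.getD_modify, Ne.symm hk]
      · simp [pvStep, h1, PySem.Set.contains, List.contains_eq_mem]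

-- A's per-column scan over the rows
def pvColFold (c : String) (rows : List (List (String × String))) (s : PySem.Set String) : PySem.Set String :=
  rows.foldl (fun s row =>
    match (PySem.Dict.mk row).get? c with
    | some v => pvAdd s v
    | none => s) s

-- B's index, read at a wanted column c, is exactly A's per-column scan
theorem getD_index (w : PySem.Set String) (c : String) (hw : w.contains c = true)
    (rows : List (List (String × String))) :
    ∀ (ix : PySem.Dict String (PySem.Set String)),
      (rows.foldl (fun index row => (pvRowItems row).foldl (pvStep w) index) ix).getD c PySem.Set.empty =
        pvColFold c rows (ix.getD c PySem.Set.empty) := by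
  induction rows with
  | nil => intro ix; rfl
  | cons row t ih =>
    intro ix
    rw [List.foldl_cons, ih]
    unfold pvColFold
    rw [List.foldl_cons]
    congr 1
    rw [getD_foldl_pvStep w c hw, pvRowItems, filter_pvRowItemsAux c row PySem.Set.empty]
    rw [show (PySem.Set.empty : PySem.Set String).contains c = false from rfl]
    simp only [if_false, Bool.false_eq_true]
    cases (PySem.Dict.mk row).get? c <;> rfl

theorem contains_ofList_of_mem (xs : List String) (c : String) (h : c ∈ xs) :
    (PySem.Set.ofList xs).contains c = true := by
  simp only [PySem.Set.contains, List.contains_iff_mem]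
  exact (PySem.Set.mem_ofList xs c).mpr h

-- ===== VERDICT (by name: the statement is the Claim_ definition above) =====
theorem extract_value_hints_py_spec : Claim_equal_extract_value_hints_py := by
  intro sample_data col_names _
  unfold Spec_extract_value_hints_py extract_value_hints_py extract_value_hints_py_alt
  by_cases hsd : sample_data = []
  · simp [hsd]
  · simp only [hsd, if_false]
    congr 1
    apply PySem.List.foldl_congr_mem
    intro acc col hcol
    have hw := contains_ofList_of_mem col_names col hcol
    rw [getD_index (PySem.Set.ofList col_names) col hw sample_data PySem.Dict.empty]
    rw [PySem.Dict.getD_empty]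
    rfl
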